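-- pv_equiv track=rewrite | github.com/abraia/abraia-multiple | abraia/training/__init__.py | load_task
-- ===== SOURCE A (Python) =====
-- def load_task(annotations):
--     classify, detect, segment = False, False, False
--     for annotation in annotations:
--         for object in annotation.get('objects', []):
--             if 'polygon' in object:
--                 segment = True
--             elif 'box' in object:
--                 detect = True
--             elif 'label' in object:
--                 classify = True
--     if segment:
--         return 'segment'
--     if detect:
--         return 'detect'
--     if classify:
--         return 'classify'
-- ===== SOURCE B (Python) =====
-- def load_task(annotations):
--     def has(key):
--         return any(key in obj for ann in annotations for obj in ann.get('objects', []))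
--     if has('polygon'):
--         return 'segment'
--     if has('box'):
--         return 'detect'
--     if has('label'):
--         return 'classify'
--     return None
-- ===== Notes on version B (the rewrite author's own statement) =====
-- stated objective: idiomatic
-- what changed: Replaced the flag-setting nested loops and elif-exclusions with three priority-ordered short-circuiting any() scans over the flattened objects, returning on the first feature found.
import Mathlib
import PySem

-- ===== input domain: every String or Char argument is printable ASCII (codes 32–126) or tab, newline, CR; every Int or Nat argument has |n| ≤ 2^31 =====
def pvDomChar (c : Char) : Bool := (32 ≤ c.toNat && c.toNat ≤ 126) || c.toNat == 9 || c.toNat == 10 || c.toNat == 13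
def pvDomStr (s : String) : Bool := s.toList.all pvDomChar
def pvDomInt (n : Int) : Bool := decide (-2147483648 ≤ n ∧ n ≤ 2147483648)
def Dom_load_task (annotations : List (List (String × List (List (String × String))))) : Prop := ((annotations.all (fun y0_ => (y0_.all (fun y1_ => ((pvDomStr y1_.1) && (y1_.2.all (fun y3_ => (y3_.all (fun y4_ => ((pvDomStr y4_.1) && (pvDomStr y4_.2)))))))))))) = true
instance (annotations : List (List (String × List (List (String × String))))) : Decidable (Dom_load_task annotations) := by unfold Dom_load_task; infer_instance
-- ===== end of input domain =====

-- B replaces A's flag-setting nested loops with three priority-ordered short-circuiting any-scans (idiomatic; same cost).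

-- ===== PORT A =====
-- the body of A's inner for-loop: elif chain updating (classify, detect, segment)
def loadTaskStep (st : Bool × Bool × Bool) (object : List (String × String)) : Bool × Bool × Bool :=
  if (PySem.Dict.mk object).contains "polygon" then (st.1, st.2.1, true)
  else if (PySem.Dict.mk object).contains "box" then (st.1, true, st.2.2)
  else if (PySem.Dict.mk object).contains "label" then (true, st.2.1, st.2.2)
  else st

def load_task (annotations : List (List (String × List (List (String × String))))) : Option String :=
  let st := annotations.foldl
    (fun st annotation => ((PySem.Dict.mk annotation).getD "objects" []).foldl loadTaskStep st)
    (false, false, false)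
  if st.2.2 then some "segment"
  else if st.2.1 then some "detect"
  else if st.1 then some "classify"
  else none

-- ===== PORT B =====
-- any(key in obj for ann in annotations for obj in ann.get('objects', []))
def loadTaskHas (annotations : List (List (String × List (List (String × String))))) (key : String) : Bool :=
  annotations.any (fun ann => ((PySem.Dict.mk ann).getD "objects" []).any
    (fun obj => (PySem.Dict.mk obj).contains key))

def load_task_alt (annotations : List (List (String × List (List (String × String))))) : Option String :=
  if loadTaskHas annotations "polygon" then some "segment"
  else if loadTaskHas annotations "box" then some "detect"
  else if loadTaskHas annotations "label" then some "classify"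
  else none

-- ===== PRECONDITION & SPEC =====
def Spec_load_task (annotations : List (List (String × List (List (String × String))))) (out : Option String) : Prop := out = load_task_alt annotations
instance (annotations : List (List (String × List (List (String × String))))) (out : Option String) : Decidable (Spec_load_task annotations out) := by unfold Spec_load_task; infer_instance

-- ===== CLAIM (what is proved, stated in full; the proofs are below) =====
def Claim_equal_load_task : Prop := ∀ (annotations : List (List (String × List (List (String × String))))), Dom_load_task annotations → Spec_load_task annotations (load_task annotations)

-- ===== LEMMAS AND PROOFS =====
def objsOf (annotations : List (List (String × List (List (String × String))))) : List (List (String × String)) :=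
  annotations.flatMap (fun ann => (PySem.Dict.mk ann).getD "objects" [])

def hasKey (obj : List (String × String)) (k : String) : Bool := (PySem.Dict.mk obj).contains k

-- A's double loop is the fold of loadTaskStep over the flattened objects list
lemma foldl_objs (annotations : List (List (String × List (List (String × String))))) (st : Bool × Bool × Bool) :
    annotations.foldl (fun st annotation => ((PySem.Dict.mk annotation).getD "objects" []).foldl loadTaskStep st) st
      = (objsOf annotations).foldl loadTaskStep st := by
  induction annotations generalizing st with
  | nil => rfl
  | cons a t ih => simp [objsOf, List.flatMap_cons, List.foldl_append, ih]

-- characterisation of the flag fold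
lemma foldl_step_char (objs : List (List (String × String))) (st : Bool × Bool × Bool) :
    objs.foldl loadTaskStep st =
      (st.1 || objs.any (fun o => !hasKey o "polygon" && !hasKey o "box" && hasKey o "label"),
       st.2.1 || objs.any (fun o => !hasKey o "polygon" && hasKey o "box"),
       st.2.2 || objs.any (fun o => hasKey o "polygon")) := by
  induction objs generalizing st with
  | nil => simp
  | cons o t ih =>
    simp only [List.foldl_cons, List.any_cons, ih]
    unfold loadTaskStep hasKey
    by_cases h1 : (PySem.Dict.mk o).contains "polygon" = true <;>
      by_cases h2 : (PySem.Dict.mk o).contains "box" = true <;>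
        by_cases h3 : (PySem.Dict.mk o).contains "label" = true <;>
          simp [h1, h2, h3]

lemma hasKey_eq_any (annotations : List (List (String × List (List (String × String))))) (k : String) :
    loadTaskHas annotations k = (objsOf annotations).any (fun o => hasKey o k) := by
  induction annotations with
  | nil => rfl
  | cons a t ih => simp [loadTaskHas, objsOf, List.flatMap_cons, hasKey]

-- ===== VERDICT (by name: the statement is the Claim_ definition above) =====
theorem load_task_spec : Claim_equal_load_task := by
  intro annotations _
  unfold Spec_load_task load_task load_task_alt
  rw [foldl_objs, foldl_step_char]
  simp only [Bool.false_or]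
  rw [hasKey_eq_any, hasKey_eq_any, hasKey_eq_any]
  set objs := objsOf annotations with hobjs
  by_cases hp : objs.any (fun o => hasKey o "polygon") = true
  · simp [hp]
  · have hp' : ∀ o ∈ objs, hasKey o "polygon" = false := by
      simpa [List.any_eq_true] using hp
    simp only [hp]
    by_cases hb : objs.any (fun o => hasKey o "box") = true
    · have : objs.any (fun o => !hasKey o "polygon" && hasKey o "box") = true := by
        rw [PySem.List.any_congr_mem (g := fun o => hasKey o "box")]
        · exact hb
        · intro o ho; simp [hp' o ho]
      simp [this, hb]
    · have hb' : ∀ o ∈ objs, hasKey o "box" = false := by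
        simpa [List.any_eq_true] using hb
      have e2 : objs.any (fun o => !hasKey o "polygon" && hasKey o "box") = false := by
        simp only [List.any_eq_false]; intro o ho; simp [hb' o ho]
      have e3 : objs.any (fun o => !hasKey o "polygon" && !hasKey o "box" && hasKey o "label")
          = objs.any (fun o => hasKey o "label") := by
        apply PySem.List.any_congr_mem; intro o ho; simp [hp' o ho, hb' o ho]
      simp [hb, e2, e3]
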